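-- pv_equiv track=rewrite | github.com/Karanjot1995/data-structures-prep | graphs/leetcode/711. Number of Distinct Islands II.py | numDistinctIslands2
-- ===== SOURCE A (Python) =====
-- def numDistinctIslands2(grid) -> int:
--   rows, cols = len(grid), len(grid[0])
--   visited = [[0 for _ in range(cols)] for _ in range(rows)]
--   islands = set()
--
--   def dfs(row,col, island):
--     island.append([row,col])
--     visited[row][col] = 1
--     directions = [[1,0], [-1,0], [0,1], [0,-1]]
--
--     for dr, dc in directions:
--       r,c = row+dr, col+dc
--       if r in range(rows) and c in range(cols) and grid[r][c]==1 and visited[r][c]!=1: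
--         dfs(r,c,island)
--
--
--   def rotations(island):
--     shapes = []
--     for i, j in [(1, 1), (1, -1), (-1, 1), (-1, -1)]:
--       # Reflection
--       shape = sorted([(x * i, y * j) for x, y in island])
--       shape = [(x - shape[0][0], y - shape[0][1]) for x, y in shape]
--       shapes.append(shape)
--
--       # Rotations
--       shape = sorted([(y * i, x * j) for x, y in island])
--       shape = [(x - shape[0][0], y - shape[0][1]) for x, y in shape]
--       shapes.append(shape)
--     return min(shapes)
--
--
--   for r in range(rows):
--     for c in range(cols):
--       if grid[r][c] == 1 and visited[r][c]!=1 :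
--         island = []
--         dfs(r,c,island)
--         islands.add(tuple(rotations(island)))
--
--   return len(islands)
-- ===== SOURCE B (Python) =====
-- # B: iterative flood fill with an explicit stack (no recursion, no recursion-limit risk)
-- # and a running minimum over the 8 dihedral transforms instead of building a shapes list.
-- def numDistinctIslands2(grid) -> int:
--   rows, cols = len(grid), len(grid[0])
--   visited = [[0] * cols for _ in range(rows)]
--   islands = set()
--
--   def flood(sr, sc):
--     island = []
--     stack = [(sr, sc)]
--     while stack:
--       r, c = stack.pop()
--       if visited[r][c] == 1:
--         continue
--       visited[r][c] = 1
--       island.append((r, c))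
--       # push in reverse so neighbours pop in the natural down/up/right/left order
--       for dr, dc in ((0, -1), (0, 1), (-1, 0), (1, 0)):
--         rr, cc = r + dr, c + dc
--         if 0 <= rr < rows and 0 <= cc < cols and grid[rr][cc] == 1 and visited[rr][cc] != 1:
--           stack.append((rr, cc))
--     return island
--
--   def canonical(island):
--     transposed = [(y, x) for x, y in island]
--     best = None
--     for sx, sy in ((1, 1), (1, -1), (-1, 1), (-1, -1)):
--       for base in (island, transposed):
--         s = sorted((x * sx, y * sy) for x, y in base)
--         s = [(x - s[0][0], y - s[0][1]) for x, y in s]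
--         if best is None or s < best:
--           best = s
--     return best
--
--   for r in range(rows):
--     for c in range(cols):
--       if grid[r][c] == 1 and visited[r][c] != 1:
--         islands.add(tuple(canonical(flood(r, c))))
--   return len(islands)
-- ===== Notes on version B (the rewrite author's own statement) =====
-- stated objective: alternative
-- what changed: The recursive dfs is replaced by an iterative flood fill over an explicit stack (pop a cell, skip if visited, mark and push the unvisited in-bounds land neighbours), and the canonical form is computed as a running minimum over the 8 dihedral transforms (with the transpose hoisted out) instead of materializing the list of 8 shapes and calling min().
import Mathlib
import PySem

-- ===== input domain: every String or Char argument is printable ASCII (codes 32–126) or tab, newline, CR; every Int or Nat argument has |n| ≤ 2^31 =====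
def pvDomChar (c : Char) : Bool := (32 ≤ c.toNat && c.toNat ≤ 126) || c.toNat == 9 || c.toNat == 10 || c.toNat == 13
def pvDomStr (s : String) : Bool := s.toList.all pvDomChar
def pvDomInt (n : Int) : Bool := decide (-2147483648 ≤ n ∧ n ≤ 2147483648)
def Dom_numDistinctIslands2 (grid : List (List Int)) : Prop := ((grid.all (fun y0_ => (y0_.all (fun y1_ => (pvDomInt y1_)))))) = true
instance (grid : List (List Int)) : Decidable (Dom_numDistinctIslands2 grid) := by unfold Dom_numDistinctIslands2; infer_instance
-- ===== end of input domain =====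

-- B replaces the recursive DFS by an explicit-stack flood fill and computes the canonical
-- shape as a running minimum over the 8 transforms (objective: alternative; equal cost).


-- ===== PORT A =====
-- shared low-level helpers, used verbatim by both ports
abbrev PvSt := List (Int × Int) × List (List Int)

-- m[r][c] with default 0 (both programs only read in-range cells of rectangular matrices)
def visD (m : List (List Int)) (r c : Int) : Int :=
  PySem.List.pyGetD (PySem.List.pyGetD m r []) c 0

-- visited[r][c] = 1
def setV (vis : List (List Int)) (r c : Int) : List (List Int) :=
  PySem.List.pySetD vis r (PySem.List.pySetD (PySem.List.pyGetD vis r []) c 1)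

-- r in range(n)
def inb (n : Nat) (i : Int) : Bool := decide (0 ≤ i) && decide (i < (n : Int))

-- the common neighbour guard: in bounds, land, not yet visited
def isCand (g : List (List Int)) (rows cols : Nat) (vis : List (List Int)) (r c : Int) : Bool :=
  inb rows r && inb cols c && (visD g r c == 1) && !(visD vis r c == 1)

-- Python tuple/list comparison '<' on (int, int) pairs and on lists of such pairs
-- (ported by hand: exact lexicographic comparison, as CPython performs on these types)
def pairLt (p q : Int × Int) : Bool := p.1 < q.1 || (p.1 == q.1 && p.2 < q.2)

def shapeLt : List (Int × Int) → List (Int × Int) → Bool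
  | [], [] => false
  | [], _ :: _ => true
  | _ :: _, [] => false
  | p :: ps, q :: qs => if pairLt p q then true else if pairLt q p then false else shapeLt ps qs

-- shape = sorted(pts); shape = [(x - shape[0][0], y - shape[0][1]) for x, y in shape]
-- (identical statement appears in both Pythons; shape[0] is never forced on an empty shape)
def normSort (pts : List (Int × Int)) : List (Int × Int) :=
  let s := PySem.List.sorted2 pts Prod.fst Prod.snd
  let h := s.headD (0, 0)
  s.map (fun p => (p.1 - h.1, p.2 - h.2))

-- one step of Python's min(): keep the first minimal element
def minStep (m x : List (Int × Int)) : List (Int × Int) := if shapeLt x m then x else m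

-- min(shapes) (shapes always has 8 elements here; Python raises on [], never reached)
def minShape : List (List (Int × Int)) → List (Int × Int)
  | [] => []
  | s :: t => t.foldl minStep s

-- A's rotations(): build the list of the 8 normalized shapes, then take its minimum
def rotationsA (island : List (Int × Int)) : List (Int × Int) :=
  minShape ((([((1 : Int), (1 : Int)), (1, -1), (-1, 1), (-1, -1)]).foldl (fun shapes ij =>
    shapes ++ [normSort (island.map (fun p => (p.1 * ij.1, p.2 * ij.2)))]
           ++ [normSort (island.map (fun p => (p.2 * ij.1, p.1 * ij.2)))]) []))

-- number of not-yet-visited entries (termination measure only; not part of either Python)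
def cnt (row : List Int) : Nat := row.countP (fun v => !(v == 1))
def unvis (vis : List (List Int)) : Nat := (vis.map cnt).sum

-- A's recursive dfs; fuel bounds the recursion depth (each call marks a fresh cell, so
-- rows*cols+1 fuel is never exhausted — the port computes exactly what the Python computes)
mutual
def dfsA (g : List (List Int)) (rows cols : Nat) : Nat → Int → Int → PvSt → PvSt
  | 0, _, _, σ => σ
  | f + 1, row, col, σ =>
    visitA g rows cols f [((1 : Int), (0 : Int)), (-1, 0), (0, 1), (0, -1)] row col
      (σ.1 ++ [(row, col)], setV σ.2 row col)
termination_by f _ _ _ => (f, 0)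

def visitA (g : List (List Int)) (rows cols : Nat) : Nat → List (Int × Int) → Int → Int → PvSt → PvSt
  | _, [], _, _, σ => σ
  | f, d :: ds, row, col, σ =>
    visitA g rows cols f ds row col
      (if isCand g rows cols σ.2 (row + d.1) (col + d.2) then
        dfsA g rows cols f (row + d.1) (col + d.2) σ
      else σ)
termination_by f ds _ _ _ => (f, ds.length + 1)
end

def numDistinctIslands2 (grid : List (List Int)) : Int :=
  let rows := grid.length
  let cols := (grid.headD []).length   -- len(grid[0]); Pre_ excludes grid = []
  let init : List (List Int) :=
    (PySem.List.pyRange 0 (rows : Int) 1).map (fun _ => (PySem.List.pyRange 0 (cols : Int) 1).map (fun _ => (0 : Int)))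
  let final :=
    (PySem.List.pyRange 0 (rows : Int) 1).foldl (fun st r =>
      (PySem.List.pyRange 0 (cols : Int) 1).foldl (fun st c =>
        if (visD grid r c == 1) && !(visD st.2 r c == 1) then
          let σ := dfsA grid rows cols (rows * cols + 1) r c ([], st.2)
          (PySem.Set.add st.1 (rotationsA σ.1), σ.2)
        else st) st)
      (([] : PySem.Set (List (Int × Int))), init)
  PySem.Set.len final.1

-- ===== PORT B =====
-- iterative flood fill; the Python stack (push/pop at the end) is modelled head-first, and
-- Python pushes the four candidates in reverse order, so they appear here in pop order.
-- The dite guard only makes the loop total; it always holds when the popped cell is in range.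
def floodB (g : List (List Int)) (rows cols : Nat) : List (Int × Int) → PvSt → PvSt
  | [], σ => σ
  | (r, c) :: rest, σ =>
    if visD σ.2 r c == 1 then floodB g rows cols rest σ
    else
      let vis' := setV σ.2 r c
      let isl' := σ.1 ++ [(r, c)]
      let cands := (([((1 : Int), (0 : Int)), (-1, 0), (0, 1), (0, -1)]).filter
          (fun d => isCand g rows cols vis' (r + d.1) (c + d.2))).map (fun d => (r + d.1, c + d.2))
      if h : unvis vis' < unvis σ.2 then floodB g rows cols (cands ++ rest) (isl', vis')
      else (isl', vis')
termination_by stack σ => (unvis σ.2, stack.length)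

-- 'if best is None or s < best: best = s'
def bestStep (best : Option (List (Int × Int))) (s : List (Int × Int)) : Option (List (Int × Int)) :=
  match best with
  | none => some s
  | some m => if shapeLt s m then some s else some m

-- B's canonical(): running minimum over the 8 transforms, transpose hoisted out
def canonicalB (island : List (Int × Int)) : List (Int × Int) :=
  let transposed := island.map (fun p => (p.2, p.1))
  let best := ([((1 : Int), (1 : Int)), (1, -1), (-1, 1), (-1, -1)]).foldl (fun best ss =>
    [island, transposed].foldl (fun best base =>
      bestStep best (normSort (base.map (fun p => (p.1 * ss.1, p.2 * ss.2))))) best) none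
  best.getD []   -- best is never None: there are always 8 candidates

def numDistinctIslands2_alt (grid : List (List Int)) : Int :=
  let rows := grid.length
  let cols := (grid.headD []).length
  let init : List (List Int) :=
    (PySem.List.pyRange 0 (rows : Int) 1).map (fun _ => (PySem.List.pyRange 0 (cols : Int) 1).map (fun _ => (0 : Int)))
  let final :=
    (PySem.List.pyRange 0 (rows : Int) 1).foldl (fun st r =>
      (PySem.List.pyRange 0 (cols : Int) 1).foldl (fun st c =>
        if (visD grid r c == 1) && !(visD st.2 r c == 1) then
          let σ := floodB grid rows cols [(r, c)] ([], st.2)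
          (PySem.Set.add st.1 (canonicalB σ.1), σ.2)
        else st) st)
      (([] : PySem.Set (List (Int × Int))), init)
  PySem.Set.len final.1

-- ===== PRECONDITION & SPEC =====
-- Pre_ excludes exactly the inputs on which the Python A raises an IndexError:
-- the empty grid (grid[0]) and grids whose later rows are shorter than the first row
-- (grid[r][c] is evaluated for every c < len(grid[0])).
def Pre_numDistinctIslands2 (grid : List (List Int)) : Prop :=
  grid ≠ [] ∧ ∀ row ∈ grid, (grid.headD []).length ≤ row.length
instance (grid : List (List Int)) : Decidable (Pre_numDistinctIslands2 grid) := by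
  unfold Pre_numDistinctIslands2; infer_instance

def pvWitness_numDistinctIslands2 : List (List Int) := [[1, 0], [0, 1]]

def Spec_numDistinctIslands2 (grid : List (List Int)) (out : Int) : Prop := out = numDistinctIslands2_alt grid
instance (grid : List (List Int)) (out : Int) : Decidable (Spec_numDistinctIslands2 grid out) := by unfold Spec_numDistinctIslands2; infer_instance

-- ===== CLAIM (what is proved, stated in full; the proofs are below) =====
def Claim_equal_numDistinctIslands2 : Prop := ∀ (grid : List (List Int)), Dom_numDistinctIslands2 grid → Pre_numDistinctIslands2 grid → Spec_numDistinctIslands2 grid (numDistinctIslands2 grid)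


-- ===== LEMMAS AND PROOFS =====

def Shp (rows cols : Nat) (vis : List (List Int)) : Prop :=
  vis.length = rows ∧ ∀ row ∈ vis, row.length = cols

def Mono (v w : List (List Int)) : Prop :=
  ∀ r c : Int, 0 ≤ r → 0 ≤ c → visD v r c = 1 → visD w r c = 1

theorem mono_refl (v : List (List Int)) : Mono v v := fun _ _ _ _ h => h

theorem mono_trans {u v w : List (List Int)} (h1 : Mono u v) (h2 : Mono v w) : Mono u w :=
  fun r c hr hc h => h2 r c hr hc (h1 r c hr hc h)

theorem pyGetD_nonneg {α : Type} (xs : List α) (i : Int) (d : α) (h : 0 ≤ i) :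
    PySem.List.pyGetD xs i d = xs.getD i.toNat d := by
  rw [show i = ((i.toNat : Nat) : Int) from (Int.toNat_of_nonneg h).symm,
    PySem.List.pyGetD_natCast, Int.toNat_natCast]

theorem visD_eq (m : List (List Int)) (r c : Int) (hr : 0 ≤ r) (hc : 0 ≤ c) :
    visD m r c = (m.getD r.toNat []).getD c.toNat 0 := by
  rw [visD, pyGetD_nonneg _ _ _ hr, pyGetD_nonneg _ _ _ hc]

theorem setV_eq (vis : List (List Int)) (r c : Int) (hr : 0 ≤ r) (hc : 0 ≤ c) :
    setV vis r c = vis.set r.toNat ((vis.getD r.toNat []).set c.toNat 1) := by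
  rw [setV, pyGetD_nonneg _ _ _ hr, PySem.List.pySetD_of_nonneg _ _ hr,
    PySem.List.pySetD_of_nonneg _ _ hc]

theorem aux_getD_set {α : Type} (l : List α) (n m : Nat) (v d : α) :
    (l.set n v).getD m d = if n = m ∧ n < l.length then v else l.getD m d := by
  simp only [List.getD_eq_getElem?_getD, List.getElem?_set]
  split_ifs with h1 <;> simp_all
  omega

theorem cnt_set_le (row : List Int) (cn : Nat) : cnt (row.set cn 1) ≤ cnt row := by
  induction row generalizing cn with
  | nil => simp
  | cons a t ih =>
    cases cn with
    | zero => simp [cnt, List.countP_cons]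
    | succ n =>
      simp only [List.set_cons_succ, cnt, List.countP_cons]
      have := ih n
      simp only [cnt] at this; omega

theorem cnt_set_lt (row : List Int) (cn : Nat) (h : cn < row.length)
    (hv : row.getD cn 0 ≠ 1) : cnt (row.set cn 1) < cnt row := by
  induction row generalizing cn with
  | nil => simp at h
  | cons a t ih =>
    cases cn with
    | zero =>
      simp only [List.getD_cons_zero] at hv
      simp [cnt, hv]
    | succ n =>
      simp only [List.getD_cons_succ] at hv
      simp only [List.length_cons] at h
      have := ih n (by omega) hv
      simp only [List.set_cons_succ, cnt, List.countP_cons] at *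
      omega

theorem unvis_set (vis : List (List Int)) (rn : Nat) (row' : List Int) (h : rn < vis.length) :
    unvis (vis.set rn row') + cnt (vis.getD rn []) = unvis vis + cnt row' := by
  induction vis generalizing rn with
  | nil => simp at h
  | cons a t ih =>
    cases rn with
    | zero => simp [unvis]; omega
    | succ n =>
      simp only [List.length_cons] at h
      have := ih n (by omega)
      simp only [List.set_cons_succ, List.getD_cons_succ, unvis, List.map_cons, List.sum_cons] at *
      omega

theorem shape_setV {rows cols : Nat} {vis : List (List Int)} (hs : Shp rows cols vis)
    (r c : Int) (hr : 0 ≤ r) (hc : 0 ≤ c) : Shp rows cols (setV vis r c) := by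
  rw [setV_eq vis r c hr hc]
  by_cases hb : r.toNat < vis.length
  · refine ⟨by simpa using hs.1, ?_⟩
    intro row hm
    rcases List.mem_or_eq_of_mem_set hm with h | h
    · exact hs.2 row h
    · subst h
      rw [List.length_set, List.getD_eq_getElem vis [] hb]
      exact hs.2 _ (List.getElem_mem hb)
  · rw [List.set_eq_of_length_le (by omega)]; exact hs

theorem mono_setV (vis : List (List Int)) (r c : Int) (hr : 0 ≤ r) (hc : 0 ≤ c) :
    Mono vis (setV vis r c) := by
  intro r' c' hr' hc' h
  rw [visD_eq _ _ _ hr' hc'] at h ⊢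
  rw [setV_eq vis r c hr hc, aux_getD_set]
  split_ifs with h1
  · rw [aux_getD_set]
    split_ifs with h2
    · rfl
    · rwa [h1.1]
  · exact h

theorem unvis_setV_le (vis : List (List Int)) (r c : Int) (hr : 0 ≤ r) (hc : 0 ≤ c) :
    unvis (setV vis r c) ≤ unvis vis := by
  rw [setV_eq vis r c hr hc]
  by_cases hb : r.toNat < vis.length
  · have h1 := unvis_set vis r.toNat ((vis.getD r.toNat []).set c.toNat 1) hb
    have h2 := cnt_set_le (vis.getD r.toNat []) c.toNat
    omega
  · rw [List.set_eq_of_length_le (by omega)]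

theorem unvis_setV_lt {rows cols : Nat} {vis : List (List Int)} (hs : Shp rows cols vis)
    (r c : Int) (hr : 0 ≤ r) (hr2 : r < rows) (hc : 0 ≤ c) (hc2 : c < cols)
    (hv : visD vis r c ≠ 1) : unvis (setV vis r c) < unvis vis := by
  rw [visD_eq _ _ _ hr hc] at hv
  rw [setV_eq vis r c hr hc]
  have hb : r.toNat < vis.length := by rw [hs.1]; omega
  have hlen : (vis.getD r.toNat []).length = cols := by
    rw [List.getD_eq_getElem vis [] hb]
    exact hs.2 _ (List.getElem_mem hb)
  have h1 := unvis_set vis r.toNat ((vis.getD r.toNat []).set c.toNat 1) hb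
  have h2 := cnt_set_lt (vis.getD r.toNat []) c.toNat (by omega) hv
  omega

theorem unvis_le_bound {rows cols : Nat} {vis : List (List Int)} (hs : Shp rows cols vis) :
    unvis vis ≤ rows * cols := by
  obtain ⟨h1, h2⟩ := hs
  subst h1
  induction vis with
  | nil => simp [unvis]
  | cons a t ih =>
    have ha : cnt a ≤ cols := by
      have := h2 a (by simp)
      simpa [cnt, this] using List.countP_le_length (l := a) (p := fun v => !(v == 1))
    have ht := ih (fun row hm => h2 row (by simp [hm]))
    simp only [unvis, List.map_cons, List.sum_cons, List.length_cons, Nat.succ_mul] at *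
    omega

theorem isCand_elim {g : List (List Int)} {rows cols : Nat} {vis : List (List Int)} {r c : Int}
    (h : isCand g rows cols vis r c = true) :
    0 ≤ r ∧ r < rows ∧ 0 ≤ c ∧ c < cols ∧ visD g r c = 1 ∧ visD vis r c ≠ 1 := by
  simp only [isCand, inb, Bool.and_eq_true, decide_eq_true_eq, beq_iff_eq,
    Bool.not_eq_true', beq_eq_false_iff_ne, ne_eq] at h
  tauto

theorem isCand_intro {g : List (List Int)} {rows cols : Nat} {vis : List (List Int)} {r c : Int}
    (h1 : 0 ≤ r) (h2 : r < rows) (h3 : 0 ≤ c) (h4 : c < cols) (h5 : visD g r c = 1)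
    (h6 : visD vis r c ≠ 1) : isCand g rows cols vis r c = true := by
  simp only [isCand, inb, Bool.and_eq_true, decide_eq_true_eq, beq_iff_eq,
    Bool.not_eq_true', beq_eq_false_iff_ne, ne_eq]
  tauto

theorem isCand_mono_false {g : List (List Int)} {rows cols : Nat} {v w : List (List Int)}
    (hm : Mono v w) {r c : Int} (h : isCand g rows cols v r c = false) :
    isCand g rows cols w r c = false := by
  cases hw : isCand g rows cols w r c
  · rfl
  · obtain ⟨h1, h2, h3, h4, h5, h6⟩ := isCand_elim hw
    have hv6 : visD v r c ≠ 1 := fun hh => h6 (hm r c h1 h3 hh)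
    rw [isCand_intro h1 h2 h3 h4 h5 hv6] at h
    exact h.symm ▸ rfl

def PdP (g : List (List Int)) (rows cols : Nat) (f : Nat) : Prop :=
  ∀ (r c : Int) (σ : PvSt), Shp rows cols σ.2 → 0 ≤ r → r < rows → 0 ≤ c → c < cols →
    Shp rows cols (dfsA g rows cols f r c σ).2 ∧ Mono σ.2 (dfsA g rows cols f r c σ).2 ∧
      unvis (dfsA g rows cols f r c σ).2 ≤ unvis σ.2

def PvP (g : List (List Int)) (rows cols : Nat) (f : Nat) : Prop :=
  ∀ (ds : List (Int × Int)) (row col : Int) (σ : PvSt), Shp rows cols σ.2 →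
    Shp rows cols (visitA g rows cols f ds row col σ).2 ∧
      Mono σ.2 (visitA g rows cols f ds row col σ).2 ∧
      unvis (visitA g rows cols f ds row col σ).2 ≤ unvis σ.2

theorem pd0 (g : List (List Int)) (rows cols : Nat) : PdP g rows cols 0 := by
  intro r c σ hs _ _ _ _
  rw [dfsA]
  exact ⟨hs, mono_refl _, le_refl _⟩

theorem stepPv (g : List (List Int)) (rows cols : Nat) (f : Nat) (hpd : PdP g rows cols f) :
    PvP g rows cols f := by
  intro ds row col
  induction ds with
  | nil =>
    intro σ hs
    rw [visitA]
    exact ⟨hs, mono_refl _, le_refl _⟩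
  | cons d ds ih =>
    intro σ hs
    rw [visitA]
    by_cases hc : isCand g rows cols σ.2 (row + d.1) (col + d.2) = true
    · obtain ⟨h1, h2, h3, h4, _, _⟩ := isCand_elim hc
      obtain ⟨hs', hm', hu'⟩ := hpd _ _ σ hs h1 h2 h3 h4
      rw [if_pos hc]
      obtain ⟨hs'', hm'', hu''⟩ := ih _ hs'
      exact ⟨hs'', mono_trans hm' hm'', le_trans hu'' hu'⟩
    · rw [if_neg hc]
      exact ih σ hs

theorem liftPd (g : List (List Int)) (rows cols : Nat) (f : Nat) (hpv : PvP g rows cols f) :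
    PdP g rows cols (f + 1) := by
  intro r c σ hs hr hr2 hc hc2
  rw [dfsA]
  obtain ⟨hs', hm', hu'⟩ :=
    hpv [((1 : Int), (0 : Int)), (-1, 0), (0, 1), (0, -1)] r c
      (σ.1 ++ [(r, c)], setV σ.2 r c) (shape_setV hs r c hr hc)
  exact ⟨hs', mono_trans (mono_setV σ.2 r c hr hc) hm',
    le_trans hu' (unvis_setV_le σ.2 r c hr hc)⟩

theorem invAll (g : List (List Int)) (rows cols : Nat) :
    ∀ f, PdP g rows cols f ∧ PvP g rows cols f := by
  intro f
  induction f with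
  | zero => exact ⟨pd0 g rows cols, stepPv g rows cols 0 (pd0 g rows cols)⟩
  | succ f ih =>
    have hpd := liftPd g rows cols f ih.2
    exact ⟨hpd, stepPv g rows cols (f + 1) hpd⟩

def SdP (g : List (List Int)) (rows cols : Nat) (f : Nat) : Prop :=
  ∀ (r c : Int) (stack : List (Int × Int)) (σ : PvSt), Shp rows cols σ.2 →
    unvis σ.2 + 1 ≤ f → isCand g rows cols σ.2 r c = true →
    floodB g rows cols ((r, c) :: stack) σ = floodB g rows cols stack (dfsA g rows cols f r c σ)

def SvP (g : List (List Int)) (rows cols : Nat) (f : Nat) : Prop :=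
  ∀ (ds : List (Int × Int)) (row col : Int) (stack : List (Int × Int)) (σ : PvSt)
    (vis₁ : List (List Int)), Shp rows cols σ.2 → unvis σ.2 + 1 ≤ f → Mono vis₁ σ.2 →
    floodB g rows cols
        (((ds.filter (fun d => isCand g rows cols vis₁ (row + d.1) (col + d.2))).map
          (fun d => (row + d.1, col + d.2))) ++ stack) σ
      = floodB g rows cols stack (visitA g rows cols f ds row col σ)

theorem liftSd (g : List (List Int)) (rows cols : Nat) (f : Nat) (hsv : SvP g rows cols f) :
    SdP g rows cols (f + 1) := by
  intro r c stack σ hs hf hcand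
  obtain ⟨hr, hr2, hc, hc2, hg, hv⟩ := isCand_elim hcand
  have hlt : unvis (setV σ.2 r c) < unvis σ.2 := unvis_setV_lt hs r c hr hr2 hc hc2 hv
  rw [floodB, if_neg (by simp [hv]), dif_pos hlt, dfsA]
  exact hsv [((1 : Int), (0 : Int)), (-1, 0), (0, 1), (0, -1)] r c stack
    (σ.1 ++ [(r, c)], setV σ.2 r c) (setV σ.2 r c) (shape_setV hs r c hr hc)
    (by dsimp only; omega) (mono_refl _)

theorem stepSv (g : List (List Int)) (rows cols : Nat) (f : Nat) (hsd : SdP g rows cols f) :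
    SvP g rows cols f := by
  intro ds row col
  induction ds with
  | nil =>
    intro stack σ vis₁ hs hf hm
    rw [visitA]
    simp only [List.filter_nil, List.map_nil, List.nil_append]
  | cons d ds ih =>
    intro stack σ vis₁ hs hf hm
    rw [visitA]
    by_cases hp : isCand g rows cols vis₁ (row + d.1) (col + d.2) = true
    · have hfil : List.filter (fun d => isCand g rows cols vis₁ (row + d.1) (col + d.2)) (d :: ds)
          = d :: List.filter (fun d => isCand g rows cols vis₁ (row + d.1) (col + d.2)) ds := by
        simp [hp]
      rw [hfil]
      simp only [List.map_cons, List.cons_append]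
      by_cases hv : visD σ.2 (row + d.1) (col + d.2) = 1
      · have hcw : isCand g rows cols σ.2 (row + d.1) (col + d.2) = false := by
          simp [isCand, hv]
        rw [floodB, if_pos (by simp [hv]), if_neg (by simp [hcw])]
        exact ih stack σ vis₁ hs hf hm
      · obtain ⟨h1, h2, h3, h4, h5, _⟩ := isCand_elim hp
        have hcv : isCand g rows cols σ.2 (row + d.1) (col + d.2) = true :=
          isCand_intro h1 h2 h3 h4 h5 hv
        rw [hsd _ _ _ σ hs hf hcv, if_pos hcv]
        obtain ⟨hs', hm', hu'⟩ := (invAll g rows cols f).1 _ _ σ hs h1 h2 h3 h4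
        exact ih stack (dfsA g rows cols f (row + d.1) (col + d.2) σ) vis₁ hs'
          (by omega) (mono_trans hm hm')
    · have hpf : isCand g rows cols vis₁ (row + d.1) (col + d.2) = false := by
        simpa using hp
      have hfil : List.filter (fun d => isCand g rows cols vis₁ (row + d.1) (col + d.2)) (d :: ds)
          = List.filter (fun d => isCand g rows cols vis₁ (row + d.1) (col + d.2)) ds := by
        simp [hpf]
      rw [hfil, if_neg (by simp [isCand_mono_false hm hpf])]
      exact ih stack σ vis₁ hs hf hm

theorem simAll (g : List (List Int)) (rows cols : Nat) :
    ∀ f, SdP g rows cols f ∧ SvP g rows cols f := by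
  intro f
  induction f with
  | zero =>
    constructor
    · intro r c stack σ _ hf _; omega
    · intro ds row col stack σ vis₁ _ hf _; omega
  | succ f ih =>
    have hsd := liftSd g rows cols f ih.2
    exact ⟨hsd, stepSv g rows cols (f + 1) hsd⟩

theorem init_shape (rows cols : Nat) :
    Shp rows cols ((PySem.List.pyRange 0 (rows : Int) 1).map
      (fun _ => (PySem.List.pyRange 0 (cols : Int) 1).map (fun _ => (0 : Int)))) := by
  constructor
  · simp [PySem.List.length_pyRange_one]
  · intro row hm
    simp only [List.mem_map] at hm
    obtain ⟨x, _, rfl⟩ := hm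
    simp [PySem.List.length_pyRange_one]

theorem foldInv {α β : Type} (P : β → Prop) (f g : β → α → β) :
    ∀ (l : List α), (∀ b a, a ∈ l → P b → f b a = g b a ∧ P (f b a)) →
      ∀ b, P b → l.foldl f b = l.foldl g b ∧ P (l.foldl f b) := by
  intro l
  induction l with
  | nil => intro _ b hb; exact ⟨rfl, hb⟩
  | cons a t ih =>
    intro h b hb
    obtain ⟨heq, hp⟩ := h b a (by simp) hb
    have := ih (fun b x hx hb => h b x (by simp [hx]) hb) (f b a) hp
    simpa [List.foldl, heq] using this

theorem bestStep_none (s : List (Int × Int)) : bestStep none s = some s := rfl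

theorem bestStep_some (m s : List (Int × Int)) : bestStep (some m) s = some (minStep m s) := by
  cases h : shapeLt s m <;> simp [bestStep, minStep, h]

theorem rot_eq (island : List (Int × Int)) : rotationsA island = canonicalB island := by
  simp [rotationsA, canonicalB, minShape, minStep, bestStep_none, bestStep_some,
    Function.comp_def, List.map_map]

theorem main_eq (grid : List (List Int)) :
    numDistinctIslands2 grid = numDistinctIslands2_alt grid := by
  rw [numDistinctIslands2, numDistinctIslands2_alt]
  simp only []
  refine congrArg PySem.Set.len (congrArg Prod.fst ?_)
  refine (foldInv (fun st => Shp grid.length (grid.headD []).length st.2) _ _ _ ?_ _ ?_).1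
  · intro st r hrm hP
    have hr := (PySem.List.mem_pyRange_one).1 hrm
    refine foldInv (fun st => Shp grid.length (grid.headD []).length st.2) _ _ _ ?_ st hP
    intro st c hcm hP
    have hc := (PySem.List.mem_pyRange_one).1 hcm
    by_cases hg : ((visD grid r c == 1) && !(visD st.2 r c == 1)) = true
    · have hg' : visD grid r c = 1 ∧ visD st.2 r c ≠ 1 := by
        simpa using hg
      have hcand := isCand_intro hr.1 hr.2 hc.1 hc.2 hg'.1 hg'.2
      have hfuel : unvis st.2 + 1 ≤ grid.length * (grid.headD []).length + 1 := by
        have := unvis_le_bound hP; omega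
      have hflood : floodB grid grid.length (grid.headD []).length [(r, c)] ([], st.2)
          = dfsA grid grid.length (grid.headD []).length
              (grid.length * (grid.headD []).length + 1) r c ([], st.2) := by
        rw [(simAll grid grid.length (grid.headD []).length
          (grid.length * (grid.headD []).length + 1)).1 r c [] ([], st.2) hP hfuel hcand]
        rw [floodB]
      rw [if_pos hg, if_pos hg, hflood, rot_eq]
      refine ⟨rfl, ?_⟩
      exact ((invAll grid grid.length (grid.headD []).length
        (grid.length * (grid.headD []).length + 1)).1 r c ([], st.2) hP
        hr.1 hr.2 hc.1 hc.2).1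
    · rw [if_neg hg, if_neg hg]
      exact ⟨rfl, hP⟩
  · exact init_shape _ _

-- ===== VERDICT (by name: the statement is the Claim_ definition above) =====
theorem numDistinctIslands2_spec : Claim_equal_numDistinctIslands2 := by
  intro grid _ _
  unfold Spec_numDistinctIslands2
  exact main_eq grid
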